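-- pv_equiv track=rewrite | github.com/jenapidev/Jean_condos_assesment | Python module/main.py | numbers_separated
-- ===== SOURCE A (Python) =====
-- from collections import Counter
--
-- def numbers_separated(vector: [int]) -> bool:
--     frequency = Counter(vector)
--
--     numbers_appearing_twice = [num for num, count in frequency.items() if count == 2]
--
--     if len(numbers_appearing_twice) != 2:
--         return False
--
--     for number in numbers_appearing_twice:
--         first_occurrence = vector.index(number)
--         second_occurrence = vector.index(number, first_occurrence + 1)
--
--         if 8 not in vector[first_occurrence + 1:second_occurrence]:
--             return False
--
--     return True
-- ===== SOURCE B (Python) =====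
-- def numbers_separated(vector: [int]) -> bool:
--     # Single pass with a running count of 8s seen so far: for each value keep
--     # (count, 8s-count just after its first occurrence, ok-flag set when its
--     # second occurrence arrives). No rescans, no slicing.
--     eights = 0
--     state = {}
--     for v in vector:
--         if v not in state:
--             state[v] = (1, eights + (1 if v == 8 else 0), False)
--         else:
--             cnt, e, ok = state[v]
--             state[v] = (cnt + 1, e, eights > e if cnt == 1 else ok)
--         if v == 8:
--             eights += 1
--
--     twice = [ok for cnt, e, ok in state.values() if cnt == 2]
--     return len(twice) == 2 and all(twice)
-- ===== Notes on version B (the rewrite author's own statement) =====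
-- stated objective: alternative
-- what changed: B makes a single pass keeping a running count of 8s seen so far and, per value, a small state machine (count, 8-count at first occurrence, ok-flag decided at the second occurrence), so the Counter pass, the repeated list.index rescans and the slice membership tests of A all disappear; at the end it just counts the values in state 'seen twice' and checks their flags.
import Mathlib
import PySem

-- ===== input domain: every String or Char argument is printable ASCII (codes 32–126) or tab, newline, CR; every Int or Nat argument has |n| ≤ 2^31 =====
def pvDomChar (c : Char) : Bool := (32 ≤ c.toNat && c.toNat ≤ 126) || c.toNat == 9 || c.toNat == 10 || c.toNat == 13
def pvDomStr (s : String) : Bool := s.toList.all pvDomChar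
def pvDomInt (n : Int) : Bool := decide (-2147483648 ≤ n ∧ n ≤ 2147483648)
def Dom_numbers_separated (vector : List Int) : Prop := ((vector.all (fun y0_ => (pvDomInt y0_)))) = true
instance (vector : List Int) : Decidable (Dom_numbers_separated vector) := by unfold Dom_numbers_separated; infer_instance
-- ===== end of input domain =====

-- B replaces A's Counter + repeated list.index rescans + slice membership tests by a single
-- pass keeping a running count of 8s and a per-value state machine (objective: alternative).

-- ===== PORT A =====
def numbers_separated (vector : List Int) : Bool :=
  let frequency := PySem.Dict.counter vector
  let numbers_appearing_twice :=
    (frequency.items.filter (fun p => p.2 == (2 : Int))).map (·.1)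
  if numbers_appearing_twice.length ≠ 2 then false
  else
    -- for-loop with early 'return False' = all
    numbers_appearing_twice.all (fun number =>
      match PySem.List.index? vector number with
      | none => false  -- unreachable here (number occurs twice); Python would raise ValueError
      | some first_occurrence =>
        match PySem.List.index? (vector.drop (first_occurrence + 1)) number with
        | none => false  -- unreachable likewise; vector.index(number, first+1) ported via drop
        | some rel =>
          let second_occurrence : Int := (first_occurrence : Int) + 1 + (rel : Int)
          decide ((8 : Int) ∈ PySem.List.slice vector (some ((first_occurrence : Int) + 1)) (some second_occurrence)))

-- ===== PORT B =====
-- loop body of Source B: state = (running count of 8s, dict value -> (count, 8s just after first occurrence, ok))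
def pvStepB (s : Int × PySem.Dict Int (Int × Int × Bool)) (v : Int) :
    Int × PySem.Dict Int (Int × Int × Bool) :=
  let eights := s.1
  let state :=
    match s.2.get? v with
    | none => s.2.insert v (1, eights + (if v == 8 then 1 else 0), false)
    | some (cnt, e, ok) => s.2.insert v (cnt + 1, e, if cnt == 1 then decide (e < eights) else ok)
  (eights + (if v == 8 then 1 else 0), state)

def numbers_separated_alt (vector : List Int) : Bool :=
  let st := vector.foldl pvStepB (0, PySem.Dict.empty)
  let twice := (st.2.values.filter (fun t => t.1 == (2 : Int))).map (fun t => t.2.2)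
  decide (twice.length = 2) && twice.all id

-- ===== PRECONDITION & SPEC =====
def Spec_numbers_separated (vector : List Int) (out : Bool) : Prop := out = numbers_separated_alt vector
instance (vector : List Int) (out : Bool) : Decidable (Spec_numbers_separated vector out) := by unfold Spec_numbers_separated; infer_instance

-- ===== CLAIM (what is proved, stated in full; the proofs are below) =====
def Claim_equal_numbers_separated : Prop := ∀ (vector : List Int), Dom_numbers_separated vector → Spec_numbers_separated vector (numbers_separated vector)

-- ===== LEMMAS AND PROOFS =====

-- indices (from offset s) at which k occurs in w
def occFrom (k : Int) (s : Nat) (w : List Int) : List Nat :=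
  match w with
  | [] => []
  | x :: xs => (if x == k then [s] else []) ++ occFrom k (s + 1) xs

-- number of 8s among the first j elements, as an Int
def cnt8 (w : List Int) (j : Nat) : Int := ((w.take j).count 8 : Int)

-- the entry B's dict holds for key k after processing w
def specEntry (k : Int) (w : List Int) : Option (Int × Int × Bool) :=
  match occFrom k 0 w with
  | [] => none
  | [a] => some (1, cnt8 w (a + 1), false)
  | a :: b :: rest => some ((rest.length : Int) + 2, cnt8 w (a + 1), decide (cnt8 w (a + 1) < cnt8 w b))

theorem occFrom_append (k : Int) (x : Int) (w : List Int) : ∀ s,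
    occFrom k s (w ++ [x]) = occFrom k s w ++ (if x == k then [s + w.length] else []) := by
  induction w with
  | nil => intro s; simp [occFrom]
  | cons y ys ih =>
    intro s
    have h : s + 1 + ys.length = s + (ys.length + 1) := by omega
    simp [occFrom, ih, List.append_assoc, h]

theorem occFrom_bounds (k : Int) (w : List Int) : ∀ s, ∀ a ∈ occFrom k s w, s ≤ a ∧ a < s + w.length := by
  induction w with
  | nil => intro s a ha; simp [occFrom] at ha
  | cons y ys ih =>
    intro s a ha
    simp only [occFrom, List.mem_append] at ha
    rcases ha with ha | ha
    · split_ifs at ha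
      · simp at ha
        simp only [List.length_cons]
        omega
      · simp at ha
    · have := ih (s + 1) a ha
      simp only [List.length_cons]
      omega

theorem length_occFrom (k : Int) (w : List Int) : ∀ s, (occFrom k s w).length = w.count k := by
  induction w with
  | nil => intro s; rfl
  | cons y ys ih =>
    intro s
    rw [List.count_cons]
    by_cases h : y = k <;> simp [occFrom, h, ih]

theorem cnt8_append_le (w : List Int) (x : Int) (j : Nat) (h : j ≤ w.length) :
    cnt8 (w ++ [x]) j = cnt8 w j := by
  simp [cnt8, List.take_append_of_le_length h]

theorem cnt8_length (w : List Int) : cnt8 w w.length = (w.count 8 : Int) := by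
  simp [cnt8]

theorem cnt8_append_full (w : List Int) (x : Int) :
    cnt8 (w ++ [x]) (w.length + 1) = (w.count 8 : Int) + (if x == 8 then 1 else 0) := by
  have h : (w ++ [x]).take (w.length + 1) = w ++ [x] := by
    apply List.take_of_length_le; simp
  rw [cnt8, h, List.count_append]
  by_cases h8 : x = 8 <;> simp [h8]

theorem specEntry_snoc_ne (k x : Int) (w : List Int) (hkx : (x == k) = false) :
    specEntry k (w ++ [x]) = specEntry k w := by
  unfold specEntry
  rw [occFrom_append k x w 0, hkx]
  rcases hocc : occFrom k 0 w with _ | ⟨a, _ | ⟨b, rest⟩⟩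
  · simp
  · have ha := occFrom_bounds k w 0 a (by rw [hocc]; simp)
    simp [cnt8_append_le w x (a + 1) (by omega)]
  · have ha := occFrom_bounds k w 0 a (by rw [hocc]; simp)
    have hb := occFrom_bounds k w 0 b (by rw [hocc]; simp)
    simp [cnt8_append_le w x (a + 1) (by omega), cnt8_append_le w x b (by omega)]

theorem not_mem_of_occ_nil (k : Int) (w : List Int) (h : occFrom k 0 w = []) : k ∉ w := by
  intro hm
  have hl := length_occFrom k w 0
  rw [h] at hl
  simp at hl
  exact absurd (List.count_pos_iff.2 hm) (by omega)

theorem mem_of_occ_ne_nil (k : Int) (w : List Int) (h : occFrom k 0 w ≠ []) : k ∈ w := by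
  have hl := length_occFrom k w 0
  have hpos : 0 < w.count k := by
    rcases hocc : occFrom k 0 w with _ | _
    · exact absurd hocc h
    · rw [hocc] at hl; simp at hl; omega
  exact List.count_pos_iff.1 hpos

-- the single-pass fold of B, characterised
theorem foldB_spec (w : List Int) :
    (w.foldl pvStepB (0, PySem.Dict.empty)).1 = (w.count 8 : Int) ∧
    (w.foldl pvStepB (0, PySem.Dict.empty)).2.keys = PySem.Set.ofList w ∧
    ∀ k, (w.foldl pvStepB (0, PySem.Dict.empty)).2.get? k = specEntry k w := by
  induction w using List.reverseRecOn with
  | nil => exact ⟨rfl, rfl, fun k => rfl⟩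
  | append_singleton w x ih =>
    obtain ⟨ih1, ih2, ih3⟩ := ih
    rw [List.foldl_append, List.foldl_cons, List.foldl_nil]
    set st := w.foldl pvStepB (0, PySem.Dict.empty) with hst
    have hcount8 : (pvStepB st x).1 = ((w ++ [x]).count 8 : Int) := by
      simp only [pvStepB]
      rw [ih1, List.count_append]
      by_cases h8 : x = 8 <;> simp [h8]
    rcases hocc : occFrom x 0 w with _ | ⟨a, _ | ⟨b, rest⟩⟩
    · -- x not yet seen: insert fresh entry
      have hx : st.2.get? x = none := by rw [ih3 x]; simp [specEntry, hocc]
      have hcontains : st.2.contains x = false := by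
        rw [PySem.Dict.contains_eq_isSome_get?, hx]; rfl
      have hxmem : x ∉ w := not_mem_of_occ_nil x w hocc
      refine ⟨hcount8, ?_, ?_⟩
      · simp only [pvStepB, hx]
        rw [PySem.Dict.keys_insert_of_not_contains st.2 _ hcontains, ih2,
            PySem.Set.ofList_append_singleton,
            PySem.Set.add_of_not_mem (by rwa [PySem.Set.mem_ofList])]
      · intro k
        simp only [pvStepB, hx]
        by_cases hk : k = x
        · subst hk
          rw [PySem.Dict.get?_insert_self]
          have hoccx : occFrom k 0 (w ++ [k]) = [w.length] := by
            rw [occFrom_append k k w 0, hocc]; simp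
          have hspec : specEntry k (w ++ [k]) =
              some (1, cnt8 (w ++ [k]) (w.length + 1), false) := by
            unfold specEntry; rw [hoccx]
          rw [hspec, cnt8_append_full, ih1]
        · rw [PySem.Dict.get?_insert_of_ne st.2 _ hk,
              ih3 k, specEntry_snoc_ne k x w (by simp; exact fun h => hk h.symm)]
    · -- x seen once: close its interval, decide the flag now
      have hx : st.2.get? x = some (1, cnt8 w (a + 1), false) := by
        rw [ih3 x]; simp [specEntry, hocc]
      have hcontains : st.2.contains x = true := by
        rw [PySem.Dict.contains_eq_isSome_get?, hx]; rfl
      have hxmem : x ∈ w := mem_of_occ_ne_nil x w (by rw [hocc]; simp)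
      have ha := occFrom_bounds x w 0 a (by rw [hocc]; simp)
      refine ⟨hcount8, ?_, ?_⟩
      · simp only [pvStepB, hx]
        rw [PySem.Dict.keys_insert_of_contains st.2 _ hcontains, ih2,
            PySem.Set.ofList_append_singleton,
            PySem.Set.add_of_mem (by rwa [PySem.Set.mem_ofList])]
      · intro k
        simp only [pvStepB, hx]
        by_cases hk : k = x
        · subst hk
          rw [PySem.Dict.get?_insert_self]
          have hoccx : occFrom k 0 (w ++ [k]) = [a, w.length] := by
            rw [occFrom_append k k w 0, hocc]; simp
          have hspec : specEntry k (w ++ [k]) =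
              some (((([] : List Nat).length : Int)) + 2, cnt8 (w ++ [k]) (a + 1),
                decide (cnt8 (w ++ [k]) (a + 1) < cnt8 (w ++ [k]) w.length)) := by
            unfold specEntry; rw [hoccx]
          rw [hspec, cnt8_append_le w k (a + 1) (by omega),
              cnt8_append_le w k w.length (le_refl _), cnt8_length, ih1]
          norm_num
        · rw [PySem.Dict.get?_insert_of_ne st.2 _ hk,
              ih3 k, specEntry_snoc_ne k x w (by simp; exact fun h => hk h.symm)]
    · -- x seen at least twice already: only the count moves
      have hx : st.2.get? x =
          some ((rest.length : Int) + 2, cnt8 w (a + 1), decide (cnt8 w (a + 1) < cnt8 w b)) := by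
        rw [ih3 x]; simp [specEntry, hocc]
      have hcontains : st.2.contains x = true := by
        rw [PySem.Dict.contains_eq_isSome_get?, hx]; rfl
      have hxmem : x ∈ w := mem_of_occ_ne_nil x w (by rw [hocc]; simp)
      have ha := occFrom_bounds x w 0 a (by rw [hocc]; simp)
      have hb := occFrom_bounds x w 0 b (by rw [hocc]; simp)
      have hcnt1 : (((rest.length : Int) + 2) == (1 : Int)) = false := by
        simp; omega
      refine ⟨hcount8, ?_, ?_⟩
      · simp only [pvStepB, hx]
        rw [PySem.Dict.keys_insert_of_contains st.2 _ hcontains, ih2,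
            PySem.Set.ofList_append_singleton,
            PySem.Set.add_of_mem (by rwa [PySem.Set.mem_ofList])]
      · intro k
        simp only [pvStepB, hx, hcnt1]
        by_cases hk : k = x
        · subst hk
          rw [PySem.Dict.get?_insert_self]
          have hoccx : occFrom k 0 (w ++ [k]) = a :: b :: (rest ++ [w.length]) := by
            rw [occFrom_append k k w 0, hocc]; simp
          have hspec : specEntry k (w ++ [k]) =
              some (((rest ++ [w.length]).length : Int) + 2, cnt8 (w ++ [k]) (a + 1),
                decide (cnt8 (w ++ [k]) (a + 1) < cnt8 (w ++ [k]) b)) := by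
            unfold specEntry; rw [hoccx]
          rw [hspec, cnt8_append_le w k (a + 1) (by omega), cnt8_append_le w k b (by omega)]
          simp
          ring
        · rw [PySem.Dict.get?_insert_of_ne st.2 _ hk,
              ih3 k, specEntry_snoc_ne k x w (by simp; exact fun h => hk h.symm)]

theorem occ_count_zero (k : Int) (w : List Int) (h : w.count k = 0) :
    PySem.List.index? w k = none ∧ ∀ s, occFrom k s w = [] := by
  constructor
  · rw [PySem.List.index?_eq_none_iff]; exact List.count_eq_zero.1 h
  · intro s
    have := length_occFrom k w s
    rw [h] at this
    exact List.length_eq_zero_iff.mp this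

theorem occ_count_one (k : Int) (w : List Int) (h : w.count k = 1) :
    ∃ m : Nat, PySem.List.index? w k = some m ∧ ∀ s, occFrom k s w = [s + m] := by
  induction w with
  | nil => simp at h
  | cons x xs ih =>
    rw [List.count_cons] at h
    by_cases hx : x = k
    · subst hx
      simp at h
      obtain ⟨-, h0⟩ := occ_count_zero x xs h
      refine ⟨0, PySem.List.index?_cons_self x xs, ?_⟩
      intro s; simp [occFrom, h0]
    · simp [hx] at h
      obtain ⟨m, hm, hp⟩ := ih h
      refine ⟨m + 1, ?_, ?_⟩
      · rw [PySem.List.index?_cons_of_ne _ hx, hm]; rfl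
      · intro s; simp [occFrom, hx, hp]; omega

theorem occ_count_two (k : Int) (w : List Int) (h : w.count k = 2) :
    ∃ n m : Nat, PySem.List.index? w k = some n ∧
      PySem.List.index? (w.drop (n + 1)) k = some m ∧
      ∀ s, occFrom k s w = [s + n, s + n + 1 + m] := by
  induction w with
  | nil => simp at h
  | cons x xs ih =>
    rw [List.count_cons] at h
    by_cases hx : x = k
    · subst hx
      simp at h
      obtain ⟨m, hm, hp⟩ := occ_count_one x xs h
      refine ⟨0, m, PySem.List.index?_cons_self x xs, by simpa using hm, ?_⟩
      intro s; simp [occFrom, hp]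
    · simp [hx] at h
      obtain ⟨n, m, hn, hm, hp⟩ := ih h
      refine ⟨n + 1, m, ?_, ?_, ?_⟩
      · rw [PySem.List.index?_cons_of_ne _ hx, hn]; rfl
      · simpa using hm
      · intro s; simp [occFrom, hx, hp]; omega

theorem mem_slice_iff_cnt8 (w : List Int) (a b : Nat) (hab : a ≤ b) :
    ((8 : Int) ∈ PySem.List.slice w (some (a : Int)) (some (b : Int))) ↔ cnt8 w a < cnt8 w b := by
  rw [PySem.List.slice_natCast]
  have hsplit : w.take b = w.take a ++ (w.drop a).take (b - a) := by
    conv_lhs => rw [show b = a + (b - a) by omega]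
    exact List.take_add
  rw [← List.count_pos_iff]
  unfold cnt8
  rw [hsplit, List.count_append]
  push_cast
  omega

theorem all_congr_mem {α : Type} (l : List α) (f g : α → Bool)
    (h : ∀ x ∈ l, f x = g x) : l.all f = l.all g := by
  induction l with
  | nil => rfl
  | cons x xs ih =>
    simp only [List.all_cons, h x (List.mem_cons_self), ih (fun y hy => h y (List.mem_cons_of_mem x hy))]

theorem spec_fst (w : List Int) (k : Int) :
    ((specEntry k w).getD (0, 0, false)).1 = (w.count k : Int) := by
  have hl := length_occFrom k w 0
  rcases hocc : occFrom k 0 w with _ | ⟨a, _ | ⟨b, rest⟩⟩ <;>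
    rw [hocc] at hl <;> unfold specEntry <;> rw [hocc] <;> simp at hl ⊢ <;> omega

-- ===== VERDICT (by name: the statement is the Claim_ definition above) =====
theorem numbers_separated_spec : Claim_equal_numbers_separated := by
  intro vector _
  unfold Spec_numbers_separated numbers_separated numbers_separated_alt
  dsimp only
  obtain ⟨h1, h2, h3⟩ := foldB_spec vector
  set st := vector.foldl pvStepB (0, PySem.Dict.empty) with hst
  have hnd : st.2.keys.Nodup := by rw [h2]; exact PySem.Set.nodup_ofList vector
  rw [PySem.Dict.values_eq_map_keys st.2 hnd (0, 0, false), h2,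
      List.map_congr_left (fun k _ =>
        (by rw [PySem.Dict.getD_eq_get?_getD, h3] :
          st.2.getD k (0, 0, false) = (specEntry k vector).getD (0, 0, false))),
      PySem.Dict.items_counter]
  rw [List.filter_map, List.filter_map, List.map_map, List.map_map]
  simp only [Function.comp_def]
  have hpred : ∀ k, ((((specEntry k vector).getD (0, 0, false)).1) == (2 : Int))
      = (((vector.count k : Int)) == (2 : Int)) := fun k => by rw [spec_fst]
  have hBL : (PySem.Set.ofList vector).filter
        (fun k => (((specEntry k vector).getD (0, 0, false)).1 == (2 : Int)))
      = (PySem.Set.ofList vector).filter (fun k => ((vector.count k : Int) == (2 : Int))) :=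
    List.filter_congr (fun k _ => hpred k)
  simp only [hBL, List.map_id', List.length_map]
  set L := (PySem.Set.ofList vector).filter (fun k => ((vector.count k : Int) == (2 : Int))) with hL
  split_ifs with h
  · simp [h]
  · have hlen : L.length = 2 := not_ne_iff.mp h
    simp only [hlen, decide_true, Bool.true_and, List.all_map, Function.comp_def, id_eq]
    apply all_congr_mem
    intro k hk
    have hcnt : vector.count k = 2 := by
      have := (List.mem_filter.1 hk).2
      simp at this
      exact_mod_cast this
    obtain ⟨n, m, hn, hm, hp⟩ := occ_count_two k vector hcnt
    have hp0 := hp 0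
    simp only [Nat.zero_add] at hp0
    have hspec2 : specEntry k vector =
        some (((([] : List Nat).length : Int)) + 2, cnt8 vector (n + 1),
          decide (cnt8 vector (n + 1) < cnt8 vector (n + 1 + m))) := by
      unfold specEntry; rw [hp0]
    simp only [hn, hm, hspec2, Option.getD_some]
    have hc1 : ((n : Int) + 1) = ((n + 1 : Nat) : Int) := by push_cast; ring
    have hc2 : (((n + 1 : Nat) : Int) + (m : Int)) = ((n + 1 + m : Nat) : Int) := by push_cast; ring
    rw [hc1, hc2, decide_eq_decide]
    exact mem_slice_iff_cnt8 vector (n + 1) (n + 1 + m) (by omega)
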